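-- pv_equiv track=rewrite | github.com/Mondego/pyreco | repoData/fengsp-shortly/allPythonContent.py | base52_encode
-- ===== SOURCE A (Python) =====
-- def base52_encode(number):
--     assert isinstance(number, int), 'integer required'
--     assert number >= 0, 'positive integer required'
--     if number == 0:
--         return '0'
--     base52 = []
--     while number != 0:
--         number, i = divmod(number, 52)
--         base52.append('abcdefghijklmnopqrstuvwxyzABCDEFGHIJKLMNOPQRSTUVWXYZ'[i])
--     return ''.join(reversed(base52))
-- ===== SOURCE B (Python) =====
-- def base52_encode(number):
--     assert isinstance(number, int), 'integer required'
--     assert number >= 0, 'positive integer required'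
--     if number == 0:
--         return '0'
--     DIGITS = 'abcdefghijklmnopqrstuvwxyzABCDEFGHIJKLMNOPQRSTUVWXYZ'
--     p = 1
--     while p * 52 <= number:
--         p *= 52
--     out = ''
--     while p > 0:
--         out += DIGITS[number // p]
--         number %= p
--         p //= 52
--     return out
-- ===== Notes on version B (the rewrite author's own statement) =====
-- stated objective: alternative
-- what changed: Replaces A's bottom-up divmod loop (append least-significant digits, then reverse/join) with a top-down algorithm: first find the largest power of 52 not exceeding the number, then peel digits most-significant-first by dividing by descending powers, so no list and no reverse are built.
import Mathlib
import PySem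

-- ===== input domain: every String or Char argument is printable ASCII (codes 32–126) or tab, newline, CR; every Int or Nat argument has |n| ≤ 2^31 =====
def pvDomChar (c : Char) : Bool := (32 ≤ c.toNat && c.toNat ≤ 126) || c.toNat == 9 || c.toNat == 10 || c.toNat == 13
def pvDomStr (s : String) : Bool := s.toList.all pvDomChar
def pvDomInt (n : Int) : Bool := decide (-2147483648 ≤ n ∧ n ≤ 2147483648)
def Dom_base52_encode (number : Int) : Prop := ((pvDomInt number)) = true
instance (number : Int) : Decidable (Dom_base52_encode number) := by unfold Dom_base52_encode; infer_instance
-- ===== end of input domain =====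

-- B encodes top-down: it finds the largest power of 52 ≤ number, then extracts digits
-- most-significant-first by division by descending powers — no list append + reverse.

def pvDigits : List Char := "abcdefghijklmnopqrstuvwxyzABCDEFGHIJKLMNOPQRSTUVWXYZ".toList

-- ===== PORT A =====
-- the while loop: number ≥ 0 throughout (the assert excludes negatives); state is (number, base52 list)
def base52Loop (n : Nat) (acc : List Char) : List Char :=
  if h : n = 0 then acc
  else base52Loop (n / 52) (acc ++ [pvDigits.getD (n % 52) 'a'])
decreasing_by exact Nat.div_lt_self (Nat.pos_of_ne_zero h) (by norm_num)

def base52_encode (number : Int) : String :=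
  if number < 0 then ""   -- guard: Python's assert raises here (outside Pre_)
  else if number = 0 then "0"
  else String.mk (base52Loop number.toNat []).reverse

-- ===== PORT B =====
-- first while loop of B: p = largest p*52^k with p*52^k ≤ n (started at p = 1)
def findPow (n p : Nat) : Nat :=
  if _h : 0 < p ∧ p * 52 ≤ n then findPow n (p * 52) else p
termination_by n - p
decreasing_by omega

-- second while loop of B: emit digit n / p, keep remainder n % p, shrink p
def extract (n p : Nat) : List Char :=
  if h : 0 < p then pvDigits.getD (n / p) 'a' :: extract (n % p) (p / 52)
  else []
termination_by p
decreasing_by exact Nat.div_lt_self h (by norm_num)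

def base52_encode_alt (number : Int) : String :=
  if number < 0 then ""   -- guard: Python's assert raises here (outside Pre_)
  else if number = 0 then "0"
  else String.mk (extract number.toNat (findPow number.toNat 1))

-- ===== PRECONDITION & SPEC =====
-- Pre_ excludes negative inputs, on which Python A raises AssertionError.
def Pre_base52_encode (number : Int) : Prop := 0 ≤ number
instance (number : Int) : Decidable (Pre_base52_encode number) := by unfold Pre_base52_encode; infer_instance
def pvWitness_base52_encode : Int := (137)
def Spec_base52_encode (number : Int) (out : String) : Prop := out = base52_encode_alt number
instance (number : Int) (out : String) : Decidable (Spec_base52_encode number out) := by unfold Spec_base52_encode; infer_instance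

-- ===== CLAIM (what is proved, stated in full; the proofs are below) =====
def Claim_equal_base52_encode : Prop := ∀ (number : Int), Dom_base52_encode number → Pre_base52_encode number → Spec_base52_encode number (base52_encode number)

-- ===== LEMMAS AND PROOFS =====

-- proof helper: least-significant-first digit list of fixed length k+1 (with leading zeros)
def padLsd : Nat → Nat → List Char
  | 0, m => [pvDigits.getD (m % 52) 'a']
  | k+1, m => pvDigits.getD (m % 52) 'a' :: padLsd k (m / 52)

theorem base52Loop_append (n : Nat) : ∀ acc, base52Loop n acc = acc ++ base52Loop n [] := by
  induction n using Nat.strong_induction_on with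
  | _ n ih =>
    intro acc
    conv_lhs => rw [base52Loop]
    conv_rhs => rw [base52Loop]
    by_cases h : n = 0
    · simp [h]
    · simp only [h, dite_false]
      rw [ih (n / 52) (Nat.div_lt_self (Nat.pos_of_ne_zero h) (by norm_num)) (acc ++ _),
          ih (n / 52) (Nat.div_lt_self (Nat.pos_of_ne_zero h) (by norm_num)) ([] ++ _)]
      simp

theorem loop_eq_pad : ∀ k m, 52 ^ k ≤ m → m < 52 ^ (k + 1) → base52Loop m [] = padLsd k m := by
  intro k
  induction k with
  | zero =>
    intro m h1 h2
    have hm : m ≠ 0 := by simp at h1; omega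
    rw [base52Loop]
    simp only [hm, dite_false]
    have hdiv : m / 52 = 0 := Nat.div_eq_of_lt (by simpa using h2)
    rw [base52Loop]
    simp [hdiv, padLsd]
  | succ k ih =>
    intro m h1 h2
    have hm : m ≠ 0 := by have := Nat.pow_pos (show 0 < 52 by norm_num) (n := k + 1); omega
    rw [base52Loop]
    simp only [hm, dite_false]
    rw [base52Loop_append]
    rw [ih (m / 52) (by rw [Nat.le_div_iff_mul_le (by norm_num), ← pow_succ]; exact h1)
          (by rw [Nat.div_lt_iff_lt_mul (by norm_num), ← pow_succ]; exact h2)]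
    simp [padLsd]

theorem padLsd_mod : ∀ k m, padLsd k (m % 52 ^ (k + 1)) = padLsd k m := by
  intro k
  induction k with
  | zero =>
    intro m
    simp [padLsd, Nat.mod_mod_of_dvd]
  | succ k ih =>
    intro m
    have h1 : m % 52 ^ (k + 2) % 52 = m % 52 :=
      Nat.mod_mod_of_dvd m (dvd_pow_self 52 (Nat.succ_ne_zero (k+1)))
    have h2 : m % 52 ^ (k + 2) / 52 = m / 52 % 52 ^ (k + 1) := by
      rw [show (52:ℕ) ^ (k + 2) = 52 * 52 ^ (k+1) by ring]
      exact Nat.mod_mul_right_div_self m 52 (52 ^ (k+1))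
    simp [padLsd, h1, h2, ih]

theorem padLsd_succ : ∀ k m, padLsd (k + 1) m = padLsd k m ++ [pvDigits.getD (m / 52 ^ (k + 1) % 52) 'a'] := by
  intro k
  induction k with
  | zero => intro m; simp [padLsd]
  | succ k ih =>
    intro m
    show pvDigits.getD (m % 52) 'a' :: padLsd (k+1) (m / 52) = _
    rw [ih (m / 52)]
    have : m / 52 / 52 ^ (k + 1) = m / 52 ^ (k + 2) := by
      rw [Nat.div_div_eq_div_mul]; congr 1; ring
    simp [padLsd, this]

theorem extract_pad : ∀ k m, m < 52 ^ (k + 1) → extract m (52 ^ k) = (padLsd k m).reverse := by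
  intro k
  induction k with
  | zero =>
    intro m h
    have hm : m % 52 = m := Nat.mod_eq_of_lt (by simpa using h)
    simp [extract, padLsd, hm]
  | succ k ih =>
    intro m h
    rw [extract]
    have hp : 0 < 52 ^ (k + 1) := Nat.pow_pos (by norm_num)
    simp only [hp, dite_true]
    have hdiv52 : 52 ^ (k + 1) / 52 = 52 ^ k := by
      rw [pow_succ]; exact Nat.mul_div_cancel _ (by norm_num)
    rw [hdiv52, ih (m % 52 ^ (k + 1)) (Nat.mod_lt m hp), padLsd_mod, padLsd_succ]
    have htop : m / 52 ^ (k + 1) % 52 = m / 52 ^ (k + 1) := by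
      apply Nat.mod_eq_of_lt
      rw [Nat.div_lt_iff_lt_mul hp, ← pow_succ']
      exact h
    simp [htop]

theorem findPow_spec : ∀ (d n p : Nat), n - p ≤ d → 0 < p → p ≤ n →
    ∃ k, findPow n p = p * 52 ^ k ∧ p * 52 ^ k ≤ n ∧ n < p * 52 ^ (k + 1) := by
  intro d
  induction d with
  | zero =>
    intro n p hd hp hpn
    rw [findPow]
    have hno : ¬(0 < p ∧ p * 52 ≤ n) := by omega
    simp only [hno, dite_false]
    exact ⟨0, by ring, by simpa using hpn, by simp [pow_succ]; omega⟩
  | succ d ih =>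
    intro n p hd hp hpn
    rw [findPow]
    by_cases h : p * 52 ≤ n
    · simp only [hp, h, and_self, dite_true]
      obtain ⟨k, h1, h2, h3⟩ := ih n (p * 52) (by omega) (by omega) h
      exact ⟨k + 1, by rw [h1]; ring, by calc p * 52 ^ (k+1) = p * 52 * 52 ^ k := by ring
                                          _ ≤ n := h2,
             by calc n < p * 52 * 52 ^ (k+1) := h3
                  _ = p * 52 ^ (k + 2) := by ring⟩
    · have hno : ¬(0 < p ∧ p * 52 ≤ n) := by tauto
      simp only [hno, dite_false]
      exact ⟨0, by ring, by simpa using hpn, by simp [pow_succ]; omega⟩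

-- ===== VERDICT (by name: the statement is the Claim_ definition above) =====
theorem base52_encode_spec : Claim_equal_base52_encode := by
  intro number _ hpre
  unfold Spec_base52_encode base52_encode base52_encode_alt
  split_ifs with h1 h2
  · rfl
  · rfl
  · have hn : 1 ≤ number.toNat := by omega
    obtain ⟨k, hq, hle, hlt⟩ :=
      findPow_spec number.toNat number.toNat 1 (by omega) (by norm_num) hn
    rw [hq, one_mul, extract_pad k number.toNat (by simpa using hlt),
        loop_eq_pad k number.toNat (by simpa using hle) (by simpa using hlt)]
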